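-- pv_equiv track=rewrite | github.com/faithk7/weread2notion | src/notion.py | _group_bookmarks_by_chapter
-- ===== SOURCE A (Python) =====
-- from typing import Any, Callable, Dict, List, Optional, Tuple, TypeAlias
--
-- def _group_bookmarks_by_chapter(bookmark_list: List[Dict]) -> Dict[int, List[Dict]]:
--     d = {}
--     for data in bookmark_list:
--         chapterUid = data.get("chapterUid", 1)
--         if chapterUid not in d:
--             d[chapterUid] = []
--         d[chapterUid].append(data)
--     return d
-- ===== SOURCE B (Python) =====
-- def _group_bookmarks_by_chapter(bookmark_list):
--     keys = dict.fromkeys(data.get("chapterUid", 1) for data in bookmark_list)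
--     return {
--         k: [data for data in bookmark_list if data.get("chapterUid", 1) == k]
--         for k in keys
--     }
-- ===== Notes on version B (the rewrite author's own statement) =====
-- stated objective: idiomatic
-- what changed: A builds the groups in one pass by mutating a dict with conditional insert + append; B first computes the distinct chapter keys in first-occurrence order with dict.fromkeys and then builds the result as a dict comprehension that filters the list once per key.
import Mathlib
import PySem

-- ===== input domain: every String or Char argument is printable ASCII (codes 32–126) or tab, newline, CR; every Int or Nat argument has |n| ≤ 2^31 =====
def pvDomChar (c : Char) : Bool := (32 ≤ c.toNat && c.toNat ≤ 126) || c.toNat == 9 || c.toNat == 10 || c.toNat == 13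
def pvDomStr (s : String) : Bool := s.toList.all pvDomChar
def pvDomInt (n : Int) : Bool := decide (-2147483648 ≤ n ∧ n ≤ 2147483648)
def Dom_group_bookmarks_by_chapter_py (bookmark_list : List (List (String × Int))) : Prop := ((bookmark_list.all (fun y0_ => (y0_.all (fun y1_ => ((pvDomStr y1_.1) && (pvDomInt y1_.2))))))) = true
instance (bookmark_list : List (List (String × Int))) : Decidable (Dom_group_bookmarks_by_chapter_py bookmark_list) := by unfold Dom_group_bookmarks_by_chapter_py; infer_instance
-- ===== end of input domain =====

-- B replaces A's one-pass mutating-dict loop by dict.fromkeys for the key order plus a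
-- filtering dict comprehension (idiomatic; same return value, no speed claim).

-- ===== PORT A =====
-- data.get("chapterUid", 1)
def pvKey (data : List (String × Int)) : Int := (PySem.Dict.mk data).getD "chapterUid" 1

def group_bookmarks_by_chapter_py (bookmark_list : List (List (String × Int))) : List (Int × List (List (String × Int))) :=
  (bookmark_list.foldl
    (fun d data =>
      let chapterUid := pvKey data
      let d' := if d.contains chapterUid then d else d.insert chapterUid ([] : List (List (String × Int)))
      d'.modify chapterUid [] (fun g => g ++ [data]))
    PySem.Dict.empty).items

-- ===== PORT B =====
def group_bookmarks_by_chapter_py_alt (bookmark_list : List (List (String × Int))) : List (Int × List (List (String × Int))) :=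
  let keys := PySem.List.dedup (bookmark_list.map (fun data => pvKey data))
  keys.map (fun k => (k, bookmark_list.filter (fun data => pvKey data == k)))

-- ===== PRECONDITION & SPEC =====
def Spec_group_bookmarks_by_chapter_py (bookmark_list : List (List (String × Int))) (out : List (Int × List (List (String × Int)))) : Prop := out = group_bookmarks_by_chapter_py_alt bookmark_list
instance (bookmark_list : List (List (String × Int))) (out : List (Int × List (List (String × Int)))) : Decidable (Spec_group_bookmarks_by_chapter_py bookmark_list out) := by unfold Spec_group_bookmarks_by_chapter_py; infer_instance

-- ===== CLAIM (what is proved, stated in full; the proofs are below) =====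
def Claim_equal_group_bookmarks_by_chapter_py : Prop := ∀ (bookmark_list : List (List (String × Int))), Dom_group_bookmarks_by_chapter_py bookmark_list → Spec_group_bookmarks_by_chapter_py bookmark_list (group_bookmarks_by_chapter_py bookmark_list)

-- ===== LEMMAS AND PROOFS =====

-- A's loop body (conditional insert of [] then append) is exactly 'modify with default []'.
theorem pv_step_eq (d : PySem.Dict Int (List (List (String × Int)))) (data : List (String × Int)) :
    (let chapterUid := pvKey data
     let d' := if d.contains chapterUid then d else d.insert chapterUid ([] : List (List (String × Int)))
     d'.modify chapterUid [] (fun g => g ++ [data]))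
    = d.modify (pvKey data) [] (fun g => g ++ [data]) := by
  by_cases h : d.contains (pvKey data)
  · simp [h]
  · simp only [h, if_neg, Bool.false_eq_true, not_false_eq_true]
    simp [PySem.Dict.modify, PySem.Dict.getD_insert_self, PySem.Dict.insert_insert_self,
      PySem.Dict.getD_of_not_contains _ _ (by simpa using h)]

theorem pv_main (l : List (List (String × Int))) :
    group_bookmarks_by_chapter_py l = group_bookmarks_by_chapter_py_alt l := by
  unfold group_bookmarks_by_chapter_py group_bookmarks_by_chapter_py_alt
  have hstep : (l.foldl
      (fun d data =>
        let chapterUid := pvKey data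
        let d' := if d.contains chapterUid then d else d.insert chapterUid ([] : List (List (String × Int)))
        d'.modify chapterUid [] (fun g => g ++ [data]))
      PySem.Dict.empty)
      = l.foldl (fun d data => d.modify (pvKey data) [] (fun g => g ++ [data])) PySem.Dict.empty := by
    congr 1
    funext d data
    exact pv_step_eq d data
  rw [hstep]
  set D := l.foldl (fun d data => d.modify (pvKey data) [] (fun g => g ++ [data])) PySem.Dict.empty with hD
  have hnd : D.keys.Nodup := by
    rw [hD]
    exact PySem.Dict.nodup_keys_foldl_modify_key l pvKey [] (fun _ data v => v ++ [data]) PySem.Dict.empty (by simp)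
  have hkeys : D.keys = PySem.List.dedup (l.map (fun data => pvKey data)) := by
    rw [hD, PySem.Dict.keys_foldl_modify_key l pvKey [] (fun _ data v => v ++ [data]) PySem.Dict.empty]
    rfl
  have hget : ∀ k, D.getD k [] = l.filter (fun data => pvKey data == k) := by
    intro k
    have := PySem.Dict.getD_foldl_modify_append (l.map (fun data => (pvKey data, data))) PySem.Dict.empty k
    rw [List.foldl_map] at this
    rw [hD]
    simp only [PySem.Dict.getD_empty] at this
    rw [this]
    rw [List.filter_map]
    simp [Function.comp_def]
  rw [PySem.Dict.items_eq_map_keys D hnd [], hkeys]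
  refine List.map_congr_left ?_
  intro k _
  rw [hget k]

-- ===== VERDICT (by name: the statement is the Claim_ definition above) =====
theorem group_bookmarks_by_chapter_py_spec : Claim_equal_group_bookmarks_by_chapter_py := by
  intro l _
  exact pv_main l
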